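-- pv_equiv track=rewrite | github.com/changhw01/MPCluster | src/mpca.py | search_last_true
-- ===== SOURCE A (Python) =====
-- def search_last_true(flags):
--     ''' Find the first index of True '''
--
--     n_flag = len(flags)
--     i = n_flag-1
--     while i > -1:
--         if flags[i]:
--             break
--         i-=1
--
--     if i == -1:
--         return None
--     else:
--         return i
-- ===== SOURCE B (Python) =====
-- def search_last_true(flags):
--     ''' Find the first index of True '''
--     result = None
--     for i, f in enumerate(flags):
--         if f:
--             result = i
--     return result
-- ===== Notes on version B (the rewrite author's own statement) =====
-- stated objective: idiomatic
-- what changed: Replaced the backward while-loop with early break by a single forward enumerate pass that keeps the most recent True index in an accumulator.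
import Mathlib
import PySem

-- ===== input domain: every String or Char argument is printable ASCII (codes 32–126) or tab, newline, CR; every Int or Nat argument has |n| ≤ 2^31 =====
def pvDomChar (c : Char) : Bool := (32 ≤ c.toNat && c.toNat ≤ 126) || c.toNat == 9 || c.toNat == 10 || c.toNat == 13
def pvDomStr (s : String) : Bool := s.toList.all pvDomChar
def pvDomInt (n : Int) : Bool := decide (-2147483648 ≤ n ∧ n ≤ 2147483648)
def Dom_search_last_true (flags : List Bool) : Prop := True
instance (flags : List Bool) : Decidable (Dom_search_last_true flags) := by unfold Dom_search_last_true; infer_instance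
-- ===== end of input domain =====

-- B replaces A's backward early-break scan by a forward enumerate pass keeping the last True index (idiomatic).

-- ===== PORT A =====
-- A's while loop 'i = n-1; while i > -1: if flags[i]: break; i -= 1', written as
-- structural recursion on k = i + 1 (so k = 0 is i = -1, loop exit).
def searchLastTrueLoopA (flags : List Bool) : Nat → Int
  | 0 => -1
  | k + 1 => if PySem.List.pyGetD flags (k : Int) false then (k : Int) else searchLastTrueLoopA flags k

def search_last_true (flags : List Bool) : Option Int :=
  let i := searchLastTrueLoopA flags flags.length
  if i = -1 then none else some i

-- ===== PORT B =====
def search_last_true_alt (flags : List Bool) : Option Int :=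
  (PySem.List.enumerate flags 0).foldl (fun result p => if p.2 then some p.1 else result) none

-- ===== PRECONDITION & SPEC =====
def Spec_search_last_true (flags : List Bool) (out : Option Int) : Prop := out = search_last_true_alt flags
instance (flags : List Bool) (out : Option Int) : Decidable (Spec_search_last_true flags out) := by unfold Spec_search_last_true; infer_instance

-- ===== CLAIM (what is proved, stated in full; the proofs are below) =====
def Claim_equal_search_last_true : Prop := ∀ (flags : List Bool), Dom_search_last_true flags → Spec_search_last_true flags (search_last_true flags)

-- ===== LEMMAS AND PROOFS =====

-- A's loop only reads indices below k, so a suffix does not matter.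
lemma loopA_append (xs ys : List Bool) (k : Nat) (hk : k ≤ xs.length) :
    searchLastTrueLoopA (xs ++ ys) k = searchLastTrueLoopA xs k := by
  induction k with
  | zero => rfl
  | succ k ih =>
    simp only [searchLastTrueLoopA, PySem.List.pyGetD_natCast,
      List.getD_append _ _ _ _ (by omega : k < xs.length)]
    rw [ih (by omega)]

lemma loopA_snoc (xs : List Bool) (b : Bool) :
    searchLastTrueLoopA (xs ++ [b]) (xs.length + 1)
      = if b then (xs.length : Int) else searchLastTrueLoopA xs xs.length := by
  simp only [searchLastTrueLoopA, PySem.List.pyGetD_natCast]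
  rw [List.getD_eq_getElem _ _ (by simp), loopA_append xs [b] xs.length (le_refl _)]
  simp

lemma alt_snoc (xs : List Bool) (b : Bool) :
    search_last_true_alt (xs ++ [b])
      = if b then some (xs.length : Int) else search_last_true_alt xs := by
  unfold search_last_true_alt
  rw [PySem.List.enumerate_append]
  simp [PySem.List.enumerate_cons, PySem.List.enumerate_nil]

lemma main_eq (flags : List Bool) : search_last_true flags = search_last_true_alt flags := by
  induction flags using List.reverseRecOn with
  | nil => rfl
  | append_singleton xs b ih =>
    rw [alt_snoc]
    unfold search_last_true
    simp only [List.length_append, List.length_singleton, loopA_snoc]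
    cases b with
    | true =>
      rw [if_pos rfl, if_pos rfl, if_neg (by omega : ¬ (xs.length : Int) = -1)]
    | false =>
      rw [if_neg (by decide : ¬ (false = true)), if_neg (by decide : ¬ (false = true))]
      exact ih

-- ===== VERDICT (by name: the statement is the Claim_ definition above) =====
theorem search_last_true_spec : Claim_equal_search_last_true := by
  intro flags _
  unfold Spec_search_last_true
  exact main_eq flags
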